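-- pv_equiv track=rewrite | github.com/suwonraison900206/TIL | 코드프로그래머스/카카오/2018/프렌즈4블록.py | solution
-- ===== SOURCE A (Python) =====
-- def solution(m, n, board):
--
--     def terminate(stack, board):
--
--         for i in range(len(stack)):
--
--             board[stack[i][0]][stack[i][1]] = 0
--             board[stack[i][0] + 1][stack[i][1]] = 0
--             board[stack[i][0]][stack[i][1] + 1] = 0
--             board[stack[i][0] + 1][stack[i][1] + 1] = 0
--
--         stack = []
--
--         for i in range(len(board)-2, -1, -1):
--             for j in range(len(board[i])):
--
--                 if board[i][j] !=0 and board[i+1][j] == 0: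
--
--                     act = 0
--                     x = i
--                     y = j
--                     while act == 0:
--                         board[x][y], board[x+1][y] = board[x+1][y] , board[x][y]
--
--                         if x+1 < len(board)-1 and board[x+2][y] == 0:
--                             x += 1
--                         else:
--                             act = 1
--
--         for i in range(len(board) - 1):
--             for j in range(n - 1):
--                 flag = board[i][j]
--                 if flag != 0 and board[i + 1][j] == flag and board[i][j + 1] == flag and board[i + 1][j + 1] == flag:
--                     stack.append([i, j])
--         if stack:
--             terminate(stack, board)
--
--     for i in range(len(board)):
--         board[i] = list(board[i])
--
--     stack = []
--     for i in range(len(board)-1):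
--         for j in range(n-1):
--             flag = board[i][j]
--             if board[i+1][j] == flag and board[i][j+1] == flag and board[i+1][j+1] == flag:
--                 stack.append([i,j])
--
--     if stack:
--         terminate(stack , board)
--
--     cnt = 0
--     for i in range(len(board)):
--         cnt = cnt + board[i].count(0)
--
--     return cnt
-- ===== SOURCE B (Python) =====
-- def solution(m, n, board):
--     for i in range(len(board)):
--         board[i] = list(board[i])
--     rows = len(board)
--     total = 0
--     while True:
--         hits = set()
--         for i in range(rows - 1):
--             for j in range(n - 1):
--                 c = board[i][j]
--                 if c != 0 and board[i + 1][j] == c and board[i][j + 1] == c and board[i + 1][j + 1] == c: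
--                     hits.update([(i, j), (i + 1, j), (i, j + 1), (i + 1, j + 1)])
--         if not hits:
--             break
--         total += len(hits)
--         for (i, j) in hits:
--             board[i][j] = 0
--         for j in range(n):
--             col = [board[i][j] for i in range(rows) if board[i][j] != 0]
--             pad = rows - len(col)
--             for i in range(rows):
--                 board[i][j] = 0 if i < pad else col[i - pad]
--     return total
-- ===== Notes on version B (the rewrite author's own statement) =====
-- stated objective: simpler
-- what changed: Replaces the recursive terminate helper (stack of top-left coords, row-major bubble-down gravity with an inner while loop) by an iterative while-True loop that collects the full set of removed cells per round and rebuilds each column directly as its surviving entries padded with zeros on top, counting removals as it goes instead of counting zeros at the end.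
-- outside the precondition, e.g. on solution(2, 2, ['AB', 'A']): A returns 0, B returns 0
import Mathlib
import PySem

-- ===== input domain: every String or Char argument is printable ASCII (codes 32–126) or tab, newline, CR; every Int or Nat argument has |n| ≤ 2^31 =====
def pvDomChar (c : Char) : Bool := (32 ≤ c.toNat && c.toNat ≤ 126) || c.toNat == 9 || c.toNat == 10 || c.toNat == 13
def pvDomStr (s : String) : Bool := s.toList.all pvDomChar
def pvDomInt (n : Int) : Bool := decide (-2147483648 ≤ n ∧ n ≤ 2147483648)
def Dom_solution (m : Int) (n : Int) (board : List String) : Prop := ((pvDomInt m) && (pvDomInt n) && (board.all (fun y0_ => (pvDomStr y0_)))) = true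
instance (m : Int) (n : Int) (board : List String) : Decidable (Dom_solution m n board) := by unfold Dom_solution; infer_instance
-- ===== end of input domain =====

-- B replaces A's recursive `terminate` (stack of top-left coords + row-major bubble-down gravity)
-- by an iterative round loop over the set of removed cells with per-column rebuild gravity,
-- counting removals instead of counting zeros at the end.  Both Pythons mutate `board` in place
-- to the same final state; the theorems below are about the return value.

-- ===== PORT A =====
-- a board cell is a character or the removed marker 0 (modelled as `none`)
abbrev PvBoard := List (List (Option Char))

def pvGet (b : PvBoard) (i j : Nat) : Option Char := (b.getD i []).getD j none
def pvSet (b : PvBoard) (i j : Nat) (v : Option Char) : PvBoard := b.modify i (fun r => r.set j v)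

-- `board[x][y], board[x+1][y] = board[x+1][y], board[x][y]`
def pvSwap (b : PvBoard) (x y : Nat) : PvBoard :=
  pvSet (pvSet b x y (pvGet b (x+1) y)) (x+1) y (pvGet b x y)

-- the inner `while act == 0` loop; fuel is a totality guard only
def pvBubble : Nat → PvBoard → Nat → Nat → PvBoard
  | 0, b, _, _ => b
  | fuel+1, b, x, y =>
    let b' := pvSwap b x y
    if x + 1 < b'.length - 1 ∧ pvGet b' (x+2) y = none then pvBubble fuel b' (x+1) y else b'

def pvGravityA (b : PvBoard) : PvBoard :=
  ((List.range (b.length - 1)).reverse).foldl (fun bb i =>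
    (List.range ((bb.getD i []).length)).foldl (fun bc j =>
      if pvGet bc i j ≠ none ∧ pvGet bc (i+1) j = none then pvBubble bc.length bc i j else bc) bb) b

-- the first scan in `solution` (no `flag != 0` test)
def pvScanA (b : PvBoard) (n : Int) : List (Nat × Nat) :=
  (List.range (b.length - 1)).foldl (fun st i =>
    (List.range (n-1).toNat).foldl (fun st j =>
      let flag := pvGet b i j
      if pvGet b (i+1) j = flag ∧ pvGet b i (j+1) = flag ∧ pvGet b (i+1) (j+1) = flag
      then st ++ [(i,j)] else st) st) []

-- the scan inside `terminate` (with the `flag != 0` test)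
def pvScanT (b : PvBoard) (n : Int) : List (Nat × Nat) :=
  (List.range (b.length - 1)).foldl (fun st i =>
    (List.range (n-1).toNat).foldl (fun st j =>
      let flag := pvGet b i j
      if flag ≠ none ∧ pvGet b (i+1) j = flag ∧ pvGet b i (j+1) = flag ∧ pvGet b (i+1) (j+1) = flag
      then st ++ [(i,j)] else st) st) []

def pvZero (stack : List (Nat × Nat)) (b : PvBoard) : PvBoard :=
  stack.foldl (fun bb p =>
    pvSet (pvSet (pvSet (pvSet bb p.1 p.2 none) (p.1+1) p.2 none) p.1 (p.2+1) none) (p.1+1) (p.2+1) none) b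

def pvCells (b : PvBoard) : Nat := b.foldl (fun c r => c + r.length) 0

-- `terminate(stack, board)`; fuel is a totality guard only (pvCells b + 1 always suffices)
def pvTerminate (n : Int) : Nat → List (Nat × Nat) → PvBoard → PvBoard
  | 0, _, b => b
  | fuel+1, stack, b =>
    let b2 := pvGravityA (pvZero stack b)
    let s' := pvScanT b2 n
    if s' = [] then b2 else pvTerminate n fuel s' b2

def solution (m : Int) (n : Int) (board : List String) : Int :=
  let b : PvBoard := board.map (fun s => s.toList.map some)
  let st := pvScanA b n
  let bf := if st = [] then b else pvTerminate n (pvCells b + 1) st b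
  bf.foldl (fun c r => c + (r.count none : Int)) 0

-- ===== PORT B =====
def pvHits (b : PvBoard) (n : Int) : PySem.Set (Nat × Nat) :=
  (List.range (b.length - 1)).foldl (fun hs i =>
    (List.range (n-1).toNat).foldl (fun hs j =>
      let c := pvGet b i j
      if c ≠ none ∧ pvGet b (i+1) j = c ∧ pvGet b i (j+1) = c ∧ pvGet b (i+1) (j+1) = c
      then PySem.Set.update hs [(i,j),(i+1,j),(i,j+1),(i+1,j+1)] else hs) hs) PySem.Set.empty

def pvClear (hits : List (Nat × Nat)) (b : PvBoard) : PvBoard :=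
  hits.foldl (fun bb p => pvSet bb p.1 p.2 none) b

def pvGravB (rows : Nat) (n : Int) (b : PvBoard) : PvBoard :=
  (List.range n.toNat).foldl (fun bb j =>
    let col := ((List.range rows).map (fun i => pvGet bb i j)).filter (fun c => c ≠ none)
    let pad := rows - col.length
    (List.range rows).foldl (fun bc i =>
      pvSet bc i j (if i < pad then none else col.getD (i - pad) none)) bb) b

-- the `while True` loop; fuel is a totality guard only (pvCells b + 1 always suffices)
def pvLoopB (n : Int) (rows : Nat) : Nat → PvBoard → Int → Int
  | 0, _, total => total
  | fuel+1, b, total =>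
    let hits := pvHits b n
    if hits = [] then total
    else pvLoopB n rows fuel (pvGravB rows n (pvClear hits b)) (total + (hits.length : Int))

def solution_alt (m : Int) (n : Int) (board : List String) : Int :=
  let b : PvBoard := board.map (fun s => s.toList.map some)
  pvLoopB n b.length (pvCells b + 1) b 0

-- ===== PRECONDITION & SPEC =====
-- Pre_ excludes boards containing a row whose length differs from n (unless n ≤ 1, where no cell
-- is ever read): on such boards A indexes rows at columns up to n-1 and neighbours at each row's
-- own length, which raises IndexError on most of them (whether it raises depends on cell contents).
def Pre_solution (m : Int) (n : Int) (board : List String) : Prop :=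
  n ≤ 1 ∨ ∀ s ∈ board, (s.toList.length : Int) = n
instance (m : Int) (n : Int) (board : List String) : Decidable (Pre_solution m n board) := by
  unfold Pre_solution; infer_instance

def pvWitness_solution : Int × Int × List String := (2, 2, ["AB", "CA"])

def Spec_solution (m : Int) (n : Int) (board : List String) (out : Int) : Prop := out = solution_alt m n board
instance (m : Int) (n : Int) (board : List String) (out : Int) : Decidable (Spec_solution m n board out) := by unfold Spec_solution; infer_instance

-- ===== CLAIM (what is proved, stated in full; the proofs are below) =====
def Claim_equal_solution : Prop := ∀ (m : Int) (n : Int) (board : List String), Dom_solution m n board → Pre_solution m n board → Spec_solution m n board (solution m n board)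

-- ===== LEMMAS AND PROOFS =====

-- proof-side notions -------------------------------------------------------
def pvRect (b : PvBoard) (k : Nat) : Prop := ∀ i, i < b.length → (b.getD i []).length = k

def pvColOf (b : PvBoard) (j : Nat) : List (Option Char) := b.map (fun r => r.getD j none)

def colSwap (c : List (Option Char)) (x : Nat) : List (Option Char) :=
  (c.set x (c.getD (x+1) none)).set (x+1) (c.getD x none)

def colBubble : Nat → List (Option Char) → Nat → List (Option Char)
  | 0, c, _ => c
  | fuel+1, c, x =>
    let c' := colSwap c x
    if x + 1 < c'.length - 1 ∧ c'.getD (x+2) none = none then colBubble fuel c' (x+1) else c'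

def colStep (c : List (Option Char)) (i : Nat) : List (Option Char) :=
  if c.getD i none ≠ none ∧ c.getD (i+1) none = none then colBubble c.length c i else c

def compactCol (c : List (Option Char)) : List (Option Char) :=
  List.replicate (c.length - (c.filter (fun x => x ≠ none)).length) none ++ c.filter (fun x => x ≠ none)

def pvMono (c : List (Option Char)) (i : Nat) : Prop :=
  ∀ a, i ≤ a → a + 1 < c.length → c.getD a none ≠ none → c.getD (a+1) none ≠ none

def matchAt (b : PvBoard) (n : Int) (i j : Nat) : Prop :=
  i < b.length - 1 ∧ j < (n-1).toNat ∧ pvGet b i j ≠ none ∧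
  pvGet b (i+1) j = pvGet b i j ∧ pvGet b i (j+1) = pvGet b i j ∧ pvGet b (i+1) (j+1) = pvGet b i j

def inQuad (p q : Nat × Nat) : Prop :=
  q = p ∨ q = (p.1+1, p.2) ∨ q = (p.1, p.2+1) ∨ q = (p.1+1, p.2+1)

def cntN (b : PvBoard) : Nat := (b.map (fun r => r.count none)).sum

def runA (n : Int) (fuel : Nat) (b : PvBoard) : PvBoard :=
  if pvScanT b n = [] then b else pvTerminate n fuel (pvScanT b n) b

-- basic get/set lemmas -----------------------------------------------------
theorem pvGetD_modify (f : List (Option Char) → List (Option Char)) (b : PvBoard) (i i' : Nat) :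
    (b.modify i f).getD i' [] = if i = i' ∧ i' < b.length then f (b.getD i' []) else b.getD i' [] := by
  rw [List.getD, List.getD, List.getElem?_modify]
  rcases Nat.lt_or_ge i' b.length with h | h
  · rw [List.getElem?_eq_getElem h]
    by_cases hii : i = i' <;> simp [hii, h]
  · rw [List.getElem?_eq_none_iff.mpr (by simpa using h)]
    simp; omega

theorem pvGetD_set (r : List (Option Char)) (j j' : Nat) (v : Option Char) :
    (r.set j v).getD j' none = if j = j' ∧ j' < r.length then v else r.getD j' none := by
  rw [List.getD, List.getD, List.getElem?_set]
  by_cases hjj : j = j'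
  · subst hjj
    rcases Nat.lt_or_ge j r.length with h | h
    · simp [h]
    · simp [Nat.not_lt.mpr h]
  · simp [hjj]

theorem length_pvSet (b : PvBoard) (i j : Nat) (v : Option Char) : (pvSet b i j v).length = b.length := by
  simp [pvSet]

theorem rowlen_pvSet (b : PvBoard) (i j : Nat) (v : Option Char) (i' : Nat) :
    ((pvSet b i j v).getD i' []).length = (b.getD i' []).length := by
  unfold pvSet
  rw [pvGetD_modify]
  split_ifs with h
  · rcases h with ⟨rfl, _⟩
    simp
  · rfl

theorem pvRect_pvSet (b : PvBoard) (i j : Nat) (v : Option Char) (k : Nat) (h : pvRect b k) :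
    pvRect (pvSet b i j v) k := by
  intro i' hi'
  rw [rowlen_pvSet]
  exact h i' (by simpa [length_pvSet] using hi')

theorem pvGet_pvSet_ne (b : PvBoard) (i j i' j' : Nat) (v : Option Char) (h : ¬(i = i' ∧ j = j')) :
    pvGet (pvSet b i j v) i' j' = pvGet b i' j' := by
  unfold pvGet pvSet
  rw [pvGetD_modify]
  split_ifs with hc
  · rcases hc with ⟨rfl, _⟩
    rw [pvGetD_set]
    split_ifs with hc2
    · exact absurd ⟨rfl, hc2.1⟩ h
    · rfl
  · rfl

theorem pvGet_pvSet_self (b : PvBoard) (i j : Nat) (v : Option Char)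
    (hi : i < b.length) (hj : j < (b.getD i []).length) :
    pvGet (pvSet b i j v) i j = v := by
  unfold pvGet pvSet
  rw [pvGetD_modify, if_pos ⟨rfl, hi⟩, pvGetD_set, if_pos ⟨rfl, hj⟩]

theorem length_pvColOf (b : PvBoard) (j : Nat) : (pvColOf b j).length = b.length := by
  simp [pvColOf]

theorem pvGet_eq_colOf (b : PvBoard) (i j : Nat) : pvGet b i j = (pvColOf b j).getD i none := by
  unfold pvGet pvColOf
  rcases Nat.lt_or_ge i b.length with hi | hi
  · simp [List.getD, List.getElem?_map, List.getElem?_eq_getElem hi]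
  · simp [List.getD, List.getElem?_eq_none_iff.mpr (by simpa using hi)]

theorem colOf_pvSet_ne (b : PvBoard) (i j : Nat) (v : Option Char) (j' : Nat) (h : j' ≠ j) :
    pvColOf (pvSet b i j v) j' = pvColOf b j' := by
  unfold pvColOf pvSet
  apply List.ext_getElem
  · simp
  · intro i' h1 h2
    simp only [List.getElem_map, List.getElem_modify]
    split_ifs with hii
    · rw [pvGetD_set]
      split_ifs with hc
      · exact absurd hc.1 (Ne.symm h)
      · rfl
    · rfl

theorem colOf_pvSet_self (b : PvBoard) (i j : Nat) (v : Option Char) (k : Nat)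
    (hrect : pvRect b k) (hj : j < k) :
    pvColOf (pvSet b i j v) j = (pvColOf b j).set i v := by
  unfold pvColOf pvSet
  apply List.ext_getElem
  · simp
  · intro i' h1 h2
    simp only [List.length_map, List.length_modify, List.length_set] at h1 h2
    simp only [List.getElem_map, List.getElem_modify, List.getElem_set]
    by_cases hii : i = i'
    · subst hii
      have hjl : j < b[i].length := by
        have := hrect i h1
        rw [List.getD, List.getElem?_eq_getElem h1] at this
        simp at this
        omega
      simp [pvGetD_set, hjl]
    · simp [hii, Ne.symm hii]

theorem pvBoard_ext (b1 b2 : PvBoard) (hl : b1.length = b2.length)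
    (hr : ∀ i, i < b1.length → (b1.getD i []).length = (b2.getD i []).length)
    (hg : ∀ i j, pvGet b1 i j = pvGet b2 i j) : b1 = b2 := by
  apply List.ext_getElem hl
  intro i h1 h2
  apply List.ext_getElem
  · have := hr i h1
    simpa [List.getD, List.getElem?_eq_getElem, h1, h2] using this
  · intro j hj1 hj2
    have := hg i j
    simpa [pvGet, List.getD, List.getElem?_eq_getElem, h1, h2,
      List.getElem?_eq_getElem hj1, List.getElem?_eq_getElem hj2] using this

-- A-side gravity = per-column pass ----------------------------------------
theorem colSwap_length (c : List (Option Char)) (x : Nat) : (colSwap c x).length = c.length := by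
  simp [colSwap]

theorem pvSwap_facts (b : PvBoard) (x y k : Nat) (hrect : pvRect b k) (hy : y < k) :
    (pvSwap b x y).length = b.length ∧ pvRect (pvSwap b x y) k ∧
    pvColOf (pvSwap b x y) y = colSwap (pvColOf b y) x ∧
    (∀ j, j ≠ y → pvColOf (pvSwap b x y) j = pvColOf b j) := by
  unfold pvSwap
  have h1 := pvRect_pvSet b x y (pvGet b (x+1) y) k hrect
  refine ⟨by rw [length_pvSet, length_pvSet], pvRect_pvSet _ _ _ _ _ h1, ?_, ?_⟩
  · rw [colOf_pvSet_self _ _ _ _ k h1 hy, colOf_pvSet_self _ _ _ _ k hrect hy]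
    unfold colSwap
    rw [pvGet_eq_colOf, pvGet_eq_colOf]
  · intro j hj
    rw [colOf_pvSet_ne _ _ _ _ _ hj, colOf_pvSet_ne _ _ _ _ _ hj]

theorem pvBubble_facts (fuel : Nat) (b : PvBoard) (x y k : Nat) (hrect : pvRect b k) (hy : y < k) :
    (pvBubble fuel b x y).length = b.length ∧ pvRect (pvBubble fuel b x y) k ∧
    pvColOf (pvBubble fuel b x y) y = colBubble fuel (pvColOf b y) x ∧
    (∀ j, j ≠ y → pvColOf (pvBubble fuel b x y) j = pvColOf b j) := by
  induction fuel generalizing b x with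
  | zero =>
    exact ⟨rfl, hrect, rfl, fun j _ => rfl⟩
  | succ f ih =>
    obtain ⟨hlen, hrect', hcol, hoth⟩ := pvSwap_facts b x y k hrect hy
    have eqA : pvBubble (f+1) b x y =
        if x + 1 < (pvSwap b x y).length - 1 ∧ pvGet (pvSwap b x y) (x+2) y = none
        then pvBubble f (pvSwap b x y) (x+1) y else pvSwap b x y := by
      simp only [pvBubble]
    have eqC : colBubble (f+1) (pvColOf b y) x =
        if x + 1 < (colSwap (pvColOf b y) x).length - 1 ∧ (colSwap (pvColOf b y) x).getD (x+2) none = none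
        then colBubble f (colSwap (pvColOf b y) x) (x+1) else colSwap (pvColOf b y) x := by
      simp only [colBubble]
    have hgiff : (x + 1 < (pvSwap b x y).length - 1 ∧ pvGet (pvSwap b x y) (x+2) y = none)
        ↔ (x + 1 < (colSwap (pvColOf b y) x).length - 1 ∧ (colSwap (pvColOf b y) x).getD (x+2) none = none) := by
      rw [colSwap_length, length_pvColOf, ← hlen, ← hcol, ← pvGet_eq_colOf]
    rw [eqA, eqC]
    by_cases hg : x + 1 < (pvSwap b x y).length - 1 ∧ pvGet (pvSwap b x y) (x+2) y = none
    · rw [if_pos hg, if_pos (hgiff.mp hg)]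
      obtain ⟨l1, r1, c1, o1⟩ := ih (pvSwap b x y) (x+1) hrect'
      refine ⟨l1.trans hlen, r1, ?_, ?_⟩
      · rw [c1, hcol]
      · intro j hj
        rw [o1 j hj, hoth j hj]
    · rw [if_neg hg, if_neg (fun hc => hg (hgiff.mpr hc))]
      exact ⟨hlen, hrect', hcol, hoth⟩

theorem gravA_inner (L : List Nat) (b : PvBoard) (i k : Nat)
    (hrect : pvRect b k) (hL : ∀ j ∈ L, j < k) (hnd : L.Nodup) :
    (L.foldl (fun bc j => if pvGet bc i j ≠ none ∧ pvGet bc (i+1) j = none then pvBubble bc.length bc i j else bc) b).length = b.length ∧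
    pvRect (L.foldl (fun bc j => if pvGet bc i j ≠ none ∧ pvGet bc (i+1) j = none then pvBubble bc.length bc i j else bc) b) k ∧
    ∀ j, pvColOf (L.foldl (fun bc j => if pvGet bc i j ≠ none ∧ pvGet bc (i+1) j = none then pvBubble bc.length bc i j else bc) b) j
      = if j ∈ L then colStep (pvColOf b j) i else pvColOf b j := by
  induction L generalizing b with
  | nil =>
    exact ⟨rfl, hrect, fun j => by simp⟩
  | cons j0 L' ih =>
    have hj0 : j0 < k := hL j0 (by simp)
    have hnd' : L'.Nodup := (List.nodup_cons.mp hnd).2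
    have hj0n : j0 ∉ L' := (List.nodup_cons.mp hnd).1
    set b1 := if pvGet b i j0 ≠ none ∧ pvGet b (i+1) j0 = none then pvBubble b.length b i j0 else b with hb1
    have hguard : (pvGet b i j0 ≠ none ∧ pvGet b (i+1) j0 = none)
        ↔ ((pvColOf b j0).getD i none ≠ none ∧ (pvColOf b j0).getD (i+1) none = none) := by
      rw [← pvGet_eq_colOf, ← pvGet_eq_colOf]
    have hfacts : b1.length = b.length ∧ pvRect b1 k ∧
        pvColOf b1 j0 = colStep (pvColOf b j0) i ∧ (∀ j, j ≠ j0 → pvColOf b1 j = pvColOf b j) := by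
      rw [hb1]
      unfold colStep
      by_cases hg : pvGet b i j0 ≠ none ∧ pvGet b (i+1) j0 = none
      · rw [if_pos hg, if_pos (hguard.mp hg)]
        obtain ⟨l1, r1, c1, o1⟩ := pvBubble_facts b.length b i j0 k hrect hj0
        exact ⟨l1, r1, by rw [c1, length_pvColOf], o1⟩
      · rw [if_neg hg, if_neg (fun hc => hg (hguard.mpr hc))]
        exact ⟨rfl, hrect, rfl, fun j _ => rfl⟩
    obtain ⟨l1, r1, c1, o1⟩ := hfacts
    obtain ⟨l2, r2, c2⟩ := ih b1 r1 (fun j hj => hL j (by simp [hj])) hnd'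
    refine ⟨l2.trans l1, r2, ?_⟩
    intro j
    simp only [List.foldl_cons, ← hb1]
    rw [c2 j]
    by_cases hj : j ∈ j0 :: L'
    · rcases List.mem_cons.mp hj with rfl | hj'
      · have : j ∉ L' := hj0n
        rw [if_neg this, if_pos hj, c1]
      · rw [if_pos hj', if_pos hj, o1 j (fun h => hj0n (h ▸ hj'))]
    · have hj1 : j ∉ L' := fun h => hj (by simp [h])
      have hj2 : j ≠ j0 := fun h => hj (by simp [h])
      rw [if_neg hj1, if_neg hj, o1 j hj2]

theorem gravA_outer (I : List Nat) (b : PvBoard) (k : Nat)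
    (hrect : pvRect b k) (hI : ∀ i ∈ I, i < b.length) :
    (I.foldl (fun bb i => (List.range ((bb.getD i []).length)).foldl (fun bc j => if pvGet bc i j ≠ none ∧ pvGet bc (i+1) j = none then pvBubble bc.length bc i j else bc) bb) b).length = b.length ∧
    pvRect (I.foldl (fun bb i => (List.range ((bb.getD i []).length)).foldl (fun bc j => if pvGet bc i j ≠ none ∧ pvGet bc (i+1) j = none then pvBubble bc.length bc i j else bc) bb) b) k ∧
    ∀ j, j < k → pvColOf (I.foldl (fun bb i => (List.range ((bb.getD i []).length)).foldl (fun bc j => if pvGet bc i j ≠ none ∧ pvGet bc (i+1) j = none then pvBubble bc.length bc i j else bc) bb) b) j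
      = I.foldl colStep (pvColOf b j) := by
  induction I generalizing b with
  | nil =>
    exact ⟨rfl, hrect, fun j _ => rfl⟩
  | cons i0 I' ih =>
    have hi0 : i0 < b.length := hI i0 (by simp)
    have hrow : (b.getD i0 []).length = k := hrect i0 hi0
    obtain ⟨l1, r1, c1⟩ := gravA_inner (List.range k) b i0 k hrect
      (fun j hj => List.mem_range.mp hj) (List.nodup_range)
    set b1 := (List.range ((b.getD i0 []).length)).foldl
      (fun bc j => if pvGet bc i0 j ≠ none ∧ pvGet bc (i0+1) j = none then pvBubble bc.length bc i0 j else bc) b with hb1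
    have hb1' : b1 = (List.range k).foldl
      (fun bc j => if pvGet bc i0 j ≠ none ∧ pvGet bc (i0+1) j = none then pvBubble bc.length bc i0 j else bc) b := by
      rw [hb1, hrow]
    obtain ⟨l2, r2, c2⟩ := ih b1 (hb1' ▸ r1) (fun i hi => by
      rw [hb1', l1]; exact hI i (by simp [hi]))
    refine ⟨?_, ?_, ?_⟩
    · simp only [List.foldl_cons]
      rw [← hb1, l2, hb1', l1]
    · simp only [List.foldl_cons]
      rw [← hb1]
      exact r2
    · intro j hj
      simp only [List.foldl_cons]
      rw [← hb1, c2 j hj, hb1', c1 j, if_pos (List.mem_range.mpr hj)]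

-- single-column pass is compaction ----------------------------------------
theorem colSwap_getD (c : List (Option Char)) (x a : Nat) (hx : x + 1 < c.length) :
    (colSwap c x).getD a none =
      if a = x then c.getD (x+1) none else if a = x+1 then c.getD x none else c.getD a none := by
  unfold colSwap
  rw [pvGetD_set, pvGetD_set]
  simp only [List.length_set]
  by_cases h1 : a = x + 1
  · subst h1
    rw [if_pos ⟨rfl, hx⟩, if_neg (by omega), if_pos rfl]
  · rw [if_neg (fun hc => h1 hc.1.symm)]
    by_cases h2 : a = x
    · subst h2
      rw [if_pos ⟨rfl, by omega⟩, if_pos rfl]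
    · rw [if_neg (fun hc => h2 hc.1.symm), if_neg h2, if_neg h1]

theorem colSwap_filter (c : List (Option Char)) (x : Nat) (hx : x + 1 < c.length)
    (h : c.getD (x+1) none = none) :
    (colSwap c x).filter (fun v => v ≠ none) = c.filter (fun v => v ≠ none) := by
  induction x generalizing c with
  | zero =>
    match c, hx with
    | a :: b0 :: t, _ =>
      have hb0 : b0 = none := h
      subst hb0
      show List.filter _ (((a :: none :: t).set 0 ((a :: none :: t).getD 1 none)).set 1 ((a :: none :: t).getD 0 none)) = _
      simp only [List.getD_cons_succ, List.getD_cons_zero, List.set_cons_zero, List.set_cons_succ]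
      by_cases ha : a = none
      · subst ha
        simp
      · simp [List.filter, ha]
  | succ x ih =>
    match c, hx with
    | a :: t, hx =>
      have hx' : x + 1 < t.length := by
        simpa using hx
      have h' : t.getD (x+1) none = none := h
      show List.filter _ (((a :: t).set (x+1) ((a :: t).getD (x+2) none)).set (x+2) ((a :: t).getD (x+1) none)) = _
      simp only [List.getD_cons_succ, List.set_cons_succ]
      have := ih t hx' h'
      unfold colSwap at this
      by_cases ha : a = none
      · subst ha
        simpa using this
      · simpa [List.filter, ha] using this

theorem colBubble_facts (fuel : Nat) (c : List (Option Char)) (x : Nat)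
    (hf : c.length ≤ fuel + x + 1) (hx : x + 1 < c.length)
    (h0 : c.getD x none ≠ none) (h1 : c.getD (x+1) none = none) (hm : pvMono c (x+1)) :
    (colBubble fuel c x).length = c.length ∧
    (colBubble fuel c x).filter (fun v => v ≠ none) = c.filter (fun v => v ≠ none) ∧
    pvMono (colBubble fuel c x) x ∧
    (∀ a, a < x → (colBubble fuel c x).getD a none = c.getD a none) := by
  induction fuel generalizing c x with
  | zero => omega
  | succ f ih =>
    have len' : (colSwap c x).length = c.length := colSwap_length c x
    have g' := colSwap_getD c x
    have filt' : (colSwap c x).filter (fun v => v ≠ none) = c.filter (fun v => v ≠ none) :=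
      colSwap_filter c x hx h1
    have eqC : colBubble (f+1) c x =
        if x + 1 < (colSwap c x).length - 1 ∧ (colSwap c x).getD (x+2) none = none
        then colBubble f (colSwap c x) (x+1) else colSwap c x := by
      simp only [colBubble]
    rw [eqC]
    by_cases hg : x + 1 < (colSwap c x).length - 1 ∧ (colSwap c x).getD (x+2) none = none
    · rw [if_pos hg]
      have hx2 : x + 2 < c.length := by omega
      obtain ⟨l2, f2, m2, u2⟩ := ih (colSwap c x) (x+1)
        (by omega) (by omega)
        (by rw [g' (x+1) hx, if_neg (by omega), if_pos rfl]; exact h0)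
        (hg.2)
        (by
          intro a ha halen hne
          rw [len'] at halen
          rw [g' a hx, if_neg (by omega), if_neg (by omega)] at hne
          rw [g' (a+1) hx, if_neg (by omega), if_neg (by omega)]
          exact hm a (by omega) halen hne)
      refine ⟨l2.trans len', f2.trans filt', ?_, ?_⟩
      · have hresx : (colBubble f (colSwap c x) (x+1)).getD x none = none := by
          rw [u2 x (by omega), g' x hx, if_pos rfl]
          exact h1
        intro a ha halen hne
        by_cases hax : a = x
        · subst hax
          exact absurd hresx hne
        · exact m2 a (by omega) halen hne
      · intro a ha
        rw [u2 a (by omega), g' a hx, if_neg (by omega), if_neg (by omega)]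
    · rw [if_neg hg]
      refine ⟨len', filt', ?_, ?_⟩
      · intro a ha halen hne
        rw [len'] at halen
        by_cases hax : a = x
        · subst hax
          rw [g' a hx, if_pos rfl] at hne
          exact absurd h1 hne
        · by_cases hax1 : a = x + 1
          · subst hax1
            have : ¬ ((colSwap c x).getD (x+2) none = none) := by
              intro hz
              exact hg ⟨by omega, hz⟩
            rw [g' (x+2) hx, if_neg (by omega), if_neg (by omega)] at this
            rw [g' (x+2) hx, if_neg (by omega), if_neg (by omega)]
            exact this
          · rw [g' a hx, if_neg hax, if_neg hax1] at hne
            rw [g' (a+1) hx, if_neg (by omega), if_neg (by omega)]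
            exact hm a (by omega) halen hne
      · intro a ha
        rw [g' a hx, if_neg (by omega), if_neg (by omega)]

theorem colStep_facts (c : List (Option Char)) (i : Nat) (hx : i + 1 < c.length) (hm : pvMono c (i+1)) :
    (colStep c i).length = c.length ∧
    (colStep c i).filter (fun v => v ≠ none) = c.filter (fun v => v ≠ none) ∧
    pvMono (colStep c i) i := by
  unfold colStep
  by_cases hg : c.getD i none ≠ none ∧ c.getD (i+1) none = none
  · rw [if_pos hg]
    obtain ⟨l2, f2, m2, _⟩ := colBubble_facts c.length c i (by omega) hx hg.1 hg.2 hm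
    exact ⟨l2, f2, m2⟩
  · rw [if_neg hg]
    refine ⟨rfl, rfl, ?_⟩
    intro a ha halen hne
    by_cases hia : a = i
    · subst hia
      by_cases hz : c.getD (a+1) none = none
      · exact absurd ⟨hne, hz⟩ hg
      · exact hz
    · exact hm a (by omega) halen hne

theorem colPass_facts (K : Nat) (c : List (Option Char)) (hm : pvMono c K) (hK : K + 1 ≤ c.length ∨ K = 0) :
    ((List.range K).reverse.foldl colStep c).length = c.length ∧
    ((List.range K).reverse.foldl colStep c).filter (fun v => v ≠ none) = c.filter (fun v => v ≠ none) ∧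
    pvMono ((List.range K).reverse.foldl colStep c) 0 := by
  induction K generalizing c with
  | zero =>
    exact ⟨rfl, rfl, hm⟩
  | succ K ih =>
    have hrev : (List.range (K+1)).reverse = K :: (List.range K).reverse := by
      simp [List.range_succ]
    have hx : K + 1 < c.length := by omega
    obtain ⟨l1, f1, m1⟩ := colStep_facts c K hx (fun a ha => hm a (by omega))
    obtain ⟨l2, f2, m2⟩ := ih (colStep c K) m1 (by omega)
    rw [hrev, List.foldl_cons]
    exact ⟨l2.trans l1, f2.trans f1, m2⟩

theorem mono_eq_compact (c : List (Option Char)) (hm : pvMono c 0) : c = compactCol c := by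
  induction c with
  | nil => rfl
  | cons a t ih =>
    have hmt : pvMono t 0 := by
      intro a' _ hlen hne
      exact hm (a'+1) (by omega) (by simpa using hlen) hne
    cases a with
    | none =>
      have hk : (t.filter (fun x => x ≠ none)).length ≤ t.length := List.length_filter_le _ _
      have : compactCol (none :: t) = none :: compactCol t := by
        unfold compactCol
        have hfe : (none :: t).filter (fun x => (x : Option Char) ≠ none) = t.filter (fun x => x ≠ none) := by
          simp
        rw [hfe]
        have hle : (none :: t).length - (t.filter (fun x => (x : Option Char) ≠ none)).length
            = (t.length - (t.filter (fun x => (x : Option Char) ≠ none)).length) + 1 := by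
          simp only [List.length_cons]
          omega
        rw [hle, List.replicate_succ]
        simp
      rw [this, ← ih hmt]
    | some v =>
      have hall : ∀ i, i < (some v :: t).length → (some v :: t).getD i none ≠ none := by
        intro i
        induction i with
        | zero => intro _ hc; simp at hc
        | succ i ihh =>
          intro hi hc
          have hii : i < (some v :: t).length := by omega
          exact hm i (by omega) (by omega) (ihh hii) hc
      have hfe : (some v :: t).filter (fun x => x ≠ none) = some v :: t := by
        apply List.filter_eq_self.mpr
        intro x hx
        obtain ⟨i, hi, rfl⟩ := List.mem_iff_getElem.mp hx
        have := hall i hi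
        rw [List.getD_eq_getElem _ _ hi] at this
        simpa using this
      unfold compactCol
      rw [hfe]
      simp

theorem colPassA_eq_compact (c : List (Option Char)) :
    (List.range (c.length - 1)).reverse.foldl colStep c = compactCol c := by
  have hm : pvMono c (c.length - 1) := by
    intro a ha halen
    omega
  obtain ⟨l1, f1, m1⟩ := colPass_facts (c.length - 1) c hm (by omega)
  have := mono_eq_compact _ m1
  rw [this]
  unfold compactCol
  rw [f1, l1]

-- B-side gravity = per-column compaction ----------------------------------
theorem pvGet_ge (b : PvBoard) (k i j : Nat) (hrect : pvRect b k) (hj : k ≤ j) :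
    pvGet b i j = none := by
  unfold pvGet
  rcases Nat.lt_or_ge i b.length with hi | hi
  · exact List.getD_eq_default _ _ (by rw [hrect i hi]; exact hj)
  · have h0 : b.getD i [] = [] := List.getD_eq_default _ _ (by simpa using hi)
    rw [h0]
    rfl

theorem readcol (bb : PvBoard) (j0 : Nat) :
    (List.range bb.length).map (fun i => pvGet bb i j0) = pvColOf bb j0 := by
  apply List.ext_getElem
  · simp [length_pvColOf]
  · intro i h1 h2
    simp only [List.getElem_map, List.getElem_range]
    rw [pvGet_eq_colOf, List.getD_eq_getElem _ _ (by simpa [length_pvColOf] using h2)]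

theorem setfold_col (L : List Nat) (b : PvBoard) (j0 k : Nat) (f : Nat → Option Char)
    (hrect : pvRect b k) (hj0 : j0 < k) :
    (L.foldl (fun bc i => pvSet bc i j0 (f i)) b).length = b.length ∧
    pvRect (L.foldl (fun bc i => pvSet bc i j0 (f i)) b) k ∧
    pvColOf (L.foldl (fun bc i => pvSet bc i j0 (f i)) b) j0 = L.foldl (fun c i => c.set i (f i)) (pvColOf b j0) ∧
    (∀ j, j ≠ j0 → pvColOf (L.foldl (fun bc i => pvSet bc i j0 (f i)) b) j = pvColOf b j) := by
  induction L generalizing b with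
  | nil => exact ⟨rfl, hrect, rfl, fun j _ => rfl⟩
  | cons i0 L' ih =>
    obtain ⟨l2, r2, c2, o2⟩ := ih (pvSet b i0 j0 (f i0)) (pvRect_pvSet _ _ _ _ _ hrect)
    refine ⟨l2.trans (length_pvSet _ _ _ _), r2, ?_, ?_⟩
    · simp only [List.foldl_cons]
      rw [c2, colOf_pvSet_self _ _ _ _ k hrect hj0]
    · intro j hj
      simp only [List.foldl_cons]
      rw [o2 j hj, colOf_pvSet_ne _ _ _ _ _ hj]

theorem setall (K : Nat) (f : Nat → Option Char) (c : List (Option Char)) (hK : K ≤ c.length) :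
    (List.range K).foldl (fun c i => c.set i (f i)) c = (List.range K).map f ++ c.drop K := by
  induction K with
  | zero => simp
  | succ K ih =>
    rw [List.range_succ, List.foldl_append, List.foldl_cons, List.foldl_nil,
      ih (by omega), List.map_append]
    have hKlen : K < c.length := by omega
    rw [List.set_append_right _ _ (by simp)]
    simp only [List.length_map, List.length_range, Nat.sub_self]
    rw [List.drop_eq_getElem_cons hKlen, List.set_cons_zero]
    simp

theorem padmap (R : Nat) (col : List (Option Char)) (hle : col.length ≤ R) :
    (List.range R).map (fun i => if i < R - col.length then none else col.getD (i - (R - col.length)) none)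
      = List.replicate (R - col.length) none ++ col := by
  apply List.ext_getElem
  · simp
    omega
  · intro i h1 h2
    simp only [List.getElem_map, List.getElem_range]
    by_cases hi : i < R - col.length
    · rw [if_pos hi, List.getElem_append_left (by simpa using hi)]
      simp
    · have hi' : R - col.length ≤ i := by omega
      rw [if_neg hi, List.getElem_append_right (by simpa using hi')]
      simp only [List.length_replicate]
      rw [List.getD_eq_getElem _ _ (by simp at h1; omega)]

-- B-side gravity = per-column compaction ----------------------------------
theorem gravB_facts (b : PvBoard) (n : Int) (k : Nat) (hrect : pvRect b k) (hk : k = n.toNat) :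
    (pvGravB b.length n b).length = b.length ∧ pvRect (pvGravB b.length n b) k ∧
    ∀ j, j < k → pvColOf (pvGravB b.length n b) j = compactCol (pvColOf b j) := by
  have main : ∀ (L : List Nat) (bb : PvBoard), pvRect bb k → bb.length = b.length → L.Nodup →
      (∀ j ∈ L, j < k) →
      (L.foldl (fun bb j =>
        (List.range b.length).foldl (fun bc i =>
          pvSet bc i j (if i < b.length - (((List.range b.length).map (fun i => pvGet bb i j)).filter (fun c => c ≠ none)).length
            then none
            else (((List.range b.length).map (fun i => pvGet bb i j)).filter (fun c => c ≠ none)).getD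
              (i - (b.length - (((List.range b.length).map (fun i => pvGet bb i j)).filter (fun c => c ≠ none)).length)) none)) bb) bb).length = bb.length ∧
      pvRect (L.foldl (fun bb j =>
        (List.range b.length).foldl (fun bc i =>
          pvSet bc i j (if i < b.length - (((List.range b.length).map (fun i => pvGet bb i j)).filter (fun c => c ≠ none)).length
            then none
            else (((List.range b.length).map (fun i => pvGet bb i j)).filter (fun c => c ≠ none)).getD
              (i - (b.length - (((List.range b.length).map (fun i => pvGet bb i j)).filter (fun c => c ≠ none)).length)) none)) bb) bb) k ∧
      ∀ j, pvColOf (L.foldl (fun bb j =>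
        (List.range b.length).foldl (fun bc i =>
          pvSet bc i j (if i < b.length - (((List.range b.length).map (fun i => pvGet bb i j)).filter (fun c => c ≠ none)).length
            then none
            else (((List.range b.length).map (fun i => pvGet bb i j)).filter (fun c => c ≠ none)).getD
              (i - (b.length - (((List.range b.length).map (fun i => pvGet bb i j)).filter (fun c => c ≠ none)).length)) none)) bb) bb) j
        = if j ∈ L then compactCol (pvColOf bb j) else pvColOf bb j := by
    intro L
    induction L with
    | nil => exact fun bb hr hl _ _ => ⟨rfl, hr, fun j => by simp⟩
    | cons j0 L' ih =>
      intro bb hr hl hnd hmem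
      have hj0 : j0 < k := hmem j0 (by simp)
      have hj0n : j0 ∉ L' := (List.nodup_cons.mp hnd).1
      have hcolread : (List.range b.length).map (fun i => pvGet bb i j0) = pvColOf bb j0 := by
        rw [← hl]; exact readcol bb j0
      set col := ((List.range b.length).map (fun i => pvGet bb i j0)).filter (fun c => c ≠ none) with hcol
      have hcol' : col = (pvColOf bb j0).filter (fun c => c ≠ none) := by rw [hcol, hcolread]
      have hcle : col.length ≤ b.length := by
        rw [hcol']
        calc ((pvColOf bb j0).filter (fun c => c ≠ none)).length ≤ (pvColOf bb j0).length :=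
              List.length_filter_le _ _
          _ = b.length := by rw [length_pvColOf, hl]
      obtain ⟨l1, r1, c1, o1⟩ := setfold_col (List.range b.length) bb j0 k
        (fun i => if i < b.length - col.length then none else col.getD (i - (b.length - col.length)) none) hr hj0
      have hb1col : pvColOf ((List.range b.length).foldl (fun bc i =>
          pvSet bc i j0 (if i < b.length - col.length then none else col.getD (i - (b.length - col.length)) none)) bb) j0
          = compactCol (pvColOf bb j0) := by
        rw [c1, setall _ _ _ (by rw [length_pvColOf, hl])]
        rw [padmap b.length col hcle]
        have hdrop : (pvColOf bb j0).drop b.length = [] := by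
          apply List.drop_eq_nil_of_le
          rw [length_pvColOf, hl]
        rw [hdrop, List.append_nil]
        unfold compactCol
        rw [← hcol', length_pvColOf, hl]
      obtain ⟨l2, r2, c2⟩ := ih _ r1 (l1.trans hl) (List.nodup_cons.mp hnd).2 (fun j hj => hmem j (by simp [hj]))
      refine ⟨l2.trans l1, r2, ?_⟩
      intro j
      simp only [List.foldl_cons]
      rw [c2 j]
      by_cases hj : j ∈ j0 :: L'
      · rcases List.mem_cons.mp hj with rfl | hj'
        · rw [if_neg hj0n, if_pos hj, hb1col]
        · rw [if_pos hj', if_pos hj, o1 j (fun h => hj0n (h ▸ hj'))]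
      · have hj1 : j ∉ L' := fun h => hj (by simp [h])
        have hj2 : j ≠ j0 := fun h => hj (by simp [h])
        rw [if_neg hj1, if_neg hj, o1 j hj2]
  obtain ⟨l, r, c⟩ := main (List.range n.toNat) b hrect rfl List.nodup_range
    (fun j hj => by rw [hk]; exact List.mem_range.mp hj)
  unfold pvGravB
  refine ⟨l, r, fun j hj => ?_⟩
  rw [hk] at hj
  rw [c j, if_pos (List.mem_range.mpr hj)]

theorem gravityA_eq_gravB (b : PvBoard) (n : Int) (k : Nat) (hrect : pvRect b k) (hk : k = n.toNat) :
    pvGravityA b = pvGravB b.length n b := by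
  obtain ⟨la, ra, ca⟩ := gravA_outer ((List.range (b.length - 1)).reverse) b k hrect
    (fun i hi => by
      have := List.mem_range.mp (List.mem_reverse.mp hi)
      omega)
  obtain ⟨lb, rb, cb⟩ := gravB_facts b n k hrect hk
  have la' : (pvGravityA b).length = b.length := la
  have ra' : pvRect (pvGravityA b) k := ra
  have ca' : ∀ j, j < k → pvColOf (pvGravityA b) j = (List.range (b.length - 1)).reverse.foldl colStep (pvColOf b j) := ca
  apply pvBoard_ext
  · rw [la', lb]
  · intro i _
    rcases Nat.lt_or_ge i b.length with hi | hi
    · rw [ra' i (by rw [la']; exact hi), rb i (by rw [lb]; exact hi)]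
    · rw [List.getD_eq_default _ _ (by rw [la']; simpa using hi),
        List.getD_eq_default _ _ (by rw [lb]; simpa using hi)]
  · intro i j
    rcases Nat.lt_or_ge j k with hj | hj
    · rw [pvGet_eq_colOf, pvGet_eq_colOf]
      have hcp := colPassA_eq_compact (pvColOf b j)
      rw [length_pvColOf] at hcp
      rw [ca' j hj, cb j hj, hcp]
    · rw [pvGet_ge _ k _ _ ra' hj, pvGet_ge _ k _ _ rb hj]

-- scans and hits -----------------------------------------------------------
theorem pv_fold_mem_iff {gamma : Type} (I : List Nat) (G : Nat → List gamma → List gamma)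
    (A : Nat → gamma → Prop) (hG : ∀ i hs x, x ∈ G i hs ↔ x ∈ hs ∨ A i x) :
    ∀ hs x, x ∈ I.foldl (fun hs i => G i hs) hs ↔ x ∈ hs ∨ ∃ i ∈ I, A i x := by
  induction I with
  | nil => simp
  | cons i0 I' ih =>
    intro hs x
    rw [List.foldl_cons, ih (G i0 hs) x, hG i0 hs x]
    constructor
    · rintro ((h | h) | ⟨i, hi, h⟩)
      · exact Or.inl h
      · exact Or.inr ⟨i0, by simp, h⟩
      · exact Or.inr ⟨i, by simp [hi], h⟩
    · rintro (h | ⟨i, hi, h⟩)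
      · exact Or.inl (Or.inl h)
      · rcases List.mem_cons.mp hi with rfl | hi'
        · exact Or.inl (Or.inr h)
        · exact Or.inr ⟨i, hi', h⟩

theorem pv_fold_nodup {gamma : Type} (I : List Nat) (G : Nat → List gamma → List gamma)
    (hG : ∀ i hs, hs.Nodup → (G i hs).Nodup) :
    ∀ hs, hs.Nodup → (I.foldl (fun hs i => G i hs) hs).Nodup := by
  induction I with
  | nil => exact fun hs h => h
  | cons i0 I' ih => exact fun hs h => ih (G i0 hs) (hG i0 hs h)

-- scans and hits -----------------------------------------------------------
theorem mem_pvScanT (b : PvBoard) (n : Int) (p : Nat × Nat) :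
    p ∈ pvScanT b n ↔ matchAt b n p.1 p.2 := by
  have hrfl : pvScanT b n = (List.range (b.length - 1)).foldl (fun st i =>
      (List.range (n-1).toNat).foldl (fun st j =>
        if pvGet b i j ≠ none ∧ pvGet b (i+1) j = pvGet b i j ∧ pvGet b i (j+1) = pvGet b i j ∧ pvGet b (i+1) (j+1) = pvGet b i j then st ++ [(i,j)] else st) st) [] := rfl
  rw [hrfl]
  rw [pv_fold_mem_iff (List.range (b.length - 1)) _
    (fun i x => ∃ j ∈ List.range (n-1).toNat, (pvGet b i j ≠ none ∧ pvGet b (i+1) j = pvGet b i j ∧ pvGet b i (j+1) = pvGet b i j ∧ pvGet b (i+1) (j+1) = pvGet b i j) ∧ x = (i, j))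
    (fun i hs x => by
      rw [pv_fold_mem_iff (List.range (n-1).toNat) _
        (fun j x => (pvGet b i j ≠ none ∧ pvGet b (i+1) j = pvGet b i j ∧ pvGet b i (j+1) = pvGet b i j ∧ pvGet b (i+1) (j+1) = pvGet b i j) ∧ x = (i, j))
        (fun j hs x => by
          show x ∈ (if pvGet b i j ≠ none ∧ pvGet b (i+1) j = pvGet b i j ∧ pvGet b i (j+1) = pvGet b i j ∧ pvGet b (i+1) (j+1) = pvGet b i j then hs ++ [(i,j)] else hs) ↔ _
          split_ifs with hc
          · simp [hc]
          · simp [hc]) hs x]) [] p]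
  simp only [List.not_mem_nil, false_or, List.mem_range]
  unfold matchAt
  constructor
  · rintro ⟨i, hi, j, hj, hc, rfl⟩
    exact ⟨hi, hj, hc⟩
  · rintro ⟨hi, hj, hc⟩
    exact ⟨p.1, hi, p.2, hj, hc, rfl⟩

theorem pvScanA_eq_pvScanT (b : PvBoard) (n : Int)
    (hz : ∀ i j, i < b.length - 1 → j < (n-1).toNat → pvGet b i j ≠ none) :
    pvScanA b n = pvScanT b n := by
  unfold pvScanA pvScanT
  apply PySem.List.foldl_congr_mem
  intro st i hi
  apply PySem.List.foldl_congr_mem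
  intro st' j hj
  have hne : pvGet b i j ≠ none := hz i j (List.mem_range.mp hi) (List.mem_range.mp hj)
  apply if_congr _ rfl rfl
  constructor
  · exact fun hc => ⟨hne, hc⟩
  · exact fun hc => hc.2

theorem mem_pvHits (b : PvBoard) (n : Int) (q : Nat × Nat) :
    q ∈ pvHits b n ↔ ∃ p, matchAt b n p.1 p.2 ∧ inQuad p q := by
  have hrfl : pvHits b n = (List.range (b.length - 1)).foldl (fun hs i =>
      (List.range (n-1).toNat).foldl (fun hs j =>
        if pvGet b i j ≠ none ∧ pvGet b (i+1) j = pvGet b i j ∧ pvGet b i (j+1) = pvGet b i j ∧ pvGet b (i+1) (j+1) = pvGet b i j then PySem.Set.update hs [(i,j),(i+1,j),(i,j+1),(i+1,j+1)] else hs) hs) [] := rfl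
  rw [hrfl]
  rw [pv_fold_mem_iff (List.range (b.length - 1)) _
    (fun i x => ∃ j ∈ List.range (n-1).toNat, (pvGet b i j ≠ none ∧ pvGet b (i+1) j = pvGet b i j ∧ pvGet b i (j+1) = pvGet b i j ∧ pvGet b (i+1) (j+1) = pvGet b i j) ∧ x ∈ ([(i,j),(i+1,j),(i,j+1),(i+1,j+1)] : List (Nat × Nat)))
    (fun i hs x => by
      rw [pv_fold_mem_iff (List.range (n-1).toNat) _
        (fun j x => (pvGet b i j ≠ none ∧ pvGet b (i+1) j = pvGet b i j ∧ pvGet b i (j+1) = pvGet b i j ∧ pvGet b (i+1) (j+1) = pvGet b i j) ∧ x ∈ ([(i,j),(i+1,j),(i,j+1),(i+1,j+1)] : List (Nat × Nat)))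
        (fun j hs x => by
          show x ∈ (if pvGet b i j ≠ none ∧ pvGet b (i+1) j = pvGet b i j ∧ pvGet b i (j+1) = pvGet b i j ∧ pvGet b (i+1) (j+1) = pvGet b i j then PySem.Set.update hs [(i,j),(i+1,j),(i,j+1),(i+1,j+1)] else hs) ↔ _
          split_ifs with hc
          · rw [PySem.Set.mem_update]
            simp [hc]
          · simp [hc]) hs x]) [] q]
  simp only [List.not_mem_nil, false_or, List.mem_range]
  unfold matchAt inQuad
  constructor
  · rintro ⟨i, hi, j, hj, hc, hq⟩
    refine ⟨(i, j), ⟨hi, hj, hc⟩, ?_⟩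
    simpa using hq
  · rintro ⟨⟨i, j⟩, ⟨hi, hj, hc⟩, hq⟩
    refine ⟨i, hi, j, hj, hc, ?_⟩
    simpa using hq

theorem nodup_pvHits (b : PvBoard) (n : Int) : (pvHits b n).Nodup := by
  show List.Nodup ((List.range (b.length - 1)).foldl (fun hs i =>
      (List.range (n-1).toNat).foldl (fun hs j =>
        if pvGet b i j ≠ none ∧ pvGet b (i+1) j = pvGet b i j ∧ pvGet b i (j+1) = pvGet b i j ∧ pvGet b (i+1) (j+1) = pvGet b i j then PySem.Set.update hs [(i,j),(i+1,j),(i,j+1),(i+1,j+1)] else hs) hs) [])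
  apply pv_fold_nodup (List.range (b.length - 1)) _
    (fun i hs h => pv_fold_nodup (List.range (n-1).toNat) _
      (fun j hs h => by
        show List.Nodup (if pvGet b i j ≠ none ∧ pvGet b (i+1) j = pvGet b i j ∧ pvGet b i (j+1) = pvGet b i j ∧ pvGet b (i+1) (j+1) = pvGet b i j then PySem.Set.update hs [(i,j),(i+1,j),(i,j+1),(i+1,j+1)] else hs)
        split_ifs with hc
        · exact PySem.Set.nodup_update hs _ h
        · exact h) hs h)
  exact List.nodup_nil

theorem pvHits_nil_iff (b : PvBoard) (n : Int) : pvHits b n = [] ↔ pvScanT b n = [] := by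
  rw [List.eq_nil_iff_forall_not_mem, List.eq_nil_iff_forall_not_mem]
  constructor
  · intro h p hp
    have hm := (mem_pvScanT b n p).mp hp
    exact h p ((mem_pvHits b n p).mpr ⟨p, hm, Or.inl rfl⟩)
  · intro h q hq
    obtain ⟨p, hm, _⟩ := (mem_pvHits b n q).mp hq
    exact h p ((mem_pvScanT b n p).mpr hm)

-- clearing cells ------------------------------------------------------------
theorem pvClear_facts (hits : List (Nat × Nat)) (b : PvBoard)
    (hin : ∀ p ∈ hits, p.1 < b.length ∧ p.2 < (b.getD p.1 []).length) :
    (pvClear hits b).length = b.length ∧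
    (∀ i, ((pvClear hits b).getD i []).length = (b.getD i []).length) ∧
    (∀ i j, pvGet (pvClear hits b) i j = if (i, j) ∈ hits then none else pvGet b i j) := by
  induction hits generalizing b with
  | nil =>
    exact ⟨rfl, fun i => rfl, fun i j => by
      show pvGet b i j = if (i, j) ∈ ([] : List (Nat × Nat)) then none else pvGet b i j
      simp⟩
  | cons p t ih =>
    have hp := hin p (by simp)
    obtain ⟨l2, r2, g2⟩ := ih (pvSet b p.1 p.2 none) (fun q hq => by
      rw [length_pvSet, rowlen_pvSet]
      exact hin q (by simp [hq]))
    refine ⟨?_, ?_, ?_⟩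
    · show (pvClear t (pvSet b p.1 p.2 none)).length = b.length
      rw [l2, length_pvSet]
    · intro i
      show ((pvClear t (pvSet b p.1 p.2 none)).getD i []).length = _
      rw [r2, rowlen_pvSet]
    · intro i j
      show pvGet (pvClear t (pvSet b p.1 p.2 none)) i j = _
      rw [g2 i j]
      by_cases hij : (i, j) = p
      · have hij' : p = (i, j) := hij.symm
        subst hij'
        by_cases ht : (i, j) ∈ t
        · rw [if_pos ht, if_pos (by simp)]
        · rw [if_neg ht, if_pos (by simp)]
          exact pvGet_pvSet_self b i j none hp.1 hp.2
      · have : pvGet (pvSet b p.1 p.2 none) i j = pvGet b i j :=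
          pvGet_pvSet_ne b p.1 p.2 i j none (by
            intro ⟨h1, h2⟩
            exact hij (by rw [← h1, ← h2]))
        rw [this]
        by_cases ht : (i, j) ∈ t
        · rw [if_pos ht, if_pos (by simp [ht])]
        · rw [if_neg ht, if_neg (by
            intro hc
            rcases List.mem_cons.mp hc with hc | hc
            · exact hij hc
            · exact ht hc)]

theorem pvZero_eq_pvClear (stack : List (Nat × Nat)) (b : PvBoard) :
    pvZero stack b = pvClear (stack.flatMap (fun p => [(p.1,p.2),(p.1+1,p.2),(p.1,p.2+1),(p.1+1,p.2+1)])) b := by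
  induction stack generalizing b with
  | nil => rfl
  | cons p t ih =>
    show pvZero t _ = _
    rw [ih]
    rfl

theorem pvZero_scanT_eq_pvClear_hits (b : PvBoard) (n : Int) (k : Nat)
    (hrect : pvRect b k) (hk : k = n.toNat) :
    pvZero (pvScanT b n) b = pvClear (pvHits b n) b := by
  have hb : ∀ q : Nat × Nat, (∃ p, matchAt b n p.1 p.2 ∧ inQuad p q) →
      q.1 < b.length ∧ q.2 < (b.getD q.1 []).length := by
    rintro q ⟨p, hm, hq⟩
    have h1 : p.1 < b.length - 1 := hm.1
    have h2 : p.2 < (n-1).toNat := hm.2.1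
    have hn2 : p.2 + 1 < k := by omega
    have hq1 : q.1 ≤ p.1 + 1 ∧ q.2 ≤ p.2 + 1 := by
      rcases hq with rfl | rfl | rfl | rfl <;> simp
    have hql : q.1 < b.length := by omega
    refine ⟨hql, ?_⟩
    rw [hrect q.1 hql]
    omega
  have hmemiff : ∀ q : Nat × Nat,
      q ∈ (pvScanT b n).flatMap (fun p => [(p.1,p.2),(p.1+1,p.2),(p.1,p.2+1),(p.1+1,p.2+1)]) ↔ q ∈ pvHits b n := by
    intro q
    rw [List.mem_flatMap, mem_pvHits]
    constructor
    · rintro ⟨p, hp, hq⟩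
      refine ⟨p, (mem_pvScanT b n p).mp hp, ?_⟩
      unfold inQuad
      simpa [Prod.ext_iff] using hq
    · rintro ⟨p, hp, hq⟩
      refine ⟨p, (mem_pvScanT b n p).mpr hp, ?_⟩
      unfold inQuad at hq
      simpa [Prod.ext_iff] using hq
  have hinF : ∀ q ∈ (pvScanT b n).flatMap (fun p => [(p.1,p.2),(p.1+1,p.2),(p.1,p.2+1),(p.1+1,p.2+1)]),
      q.1 < b.length ∧ q.2 < (b.getD q.1 []).length := by
    intro q hq
    apply hb
    have := (hmemiff q).mp hq
    obtain ⟨p, hp, hq'⟩ := (mem_pvHits b n q).mp this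
    exact ⟨p, hp, hq'⟩
  have hinH : ∀ q ∈ pvHits b n, q.1 < b.length ∧ q.2 < (b.getD q.1 []).length := by
    intro q hq
    exact hb q ((mem_pvHits b n q).mp hq)
  obtain ⟨lF, rF, gF⟩ := pvClear_facts _ b hinF
  obtain ⟨lH, rH, gH⟩ := pvClear_facts _ b hinH
  rw [pvZero_eq_pvClear]
  apply pvBoard_ext
  · rw [lF, lH]
  · intro i _
    rw [rF i, rH i]
  · intro i j
    rw [gF i j, gH i j]
    by_cases hm : (i, j) ∈ pvHits b n
    · rw [if_pos hm, if_pos ((hmemiff (i,j)).mpr hm)]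
    · rw [if_neg hm, if_neg (fun hc => hm ((hmemiff (i,j)).mp hc))]

-- counting ------------------------------------------------------------------
theorem pvRect_cons (r : List (Option Char)) (t : PvBoard) (k : Nat) :
    pvRect (r :: t) k ↔ r.length = k ∧ pvRect t k := by
  constructor
  · intro h
    refine ⟨h 0 (by simp), fun i hi => ?_⟩
    have := h (i+1) (by simpa using Nat.succ_lt_succ hi)
    simpa using this
  · rintro ⟨h0, ht⟩ i hi
    cases i with
    | zero => simpa using h0
    | succ i =>
      have := ht i (by simpa using Nat.lt_of_succ_lt_succ hi)
      simpa using this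

theorem sum_map_add_nat {α : Type} (l : List α) (f g : α → Nat) :
    (l.map (fun x => f x + g x)).sum = (l.map f).sum + (l.map g).sum := by
  induction l with
  | nil => rfl
  | cons a t ih =>
    simp [ih]
    omega

theorem sum_ind_eq_count (r : List (Option Char)) :
    ((List.range r.length).map (fun j => if r.getD j none = none then 1 else 0)).sum = r.count none := by
  induction r with
  | nil => rfl
  | cons a t ih =>
    rw [List.length_cons, List.range_succ_eq_map, List.map_cons, List.map_map, List.sum_cons]
    have hmm : (List.range t.length).map ((fun j => if (a :: t).getD j none = none then 1 else 0) ∘ (· + 1))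
        = (List.range t.length).map (fun j => if t.getD j none = none then 1 else 0) := by
      apply List.map_congr_left
      intro j _
      simp [Function.comp, List.getD_cons_succ]
    rw [hmm, ih, List.count_cons]
    simp only [List.getD_cons_zero]
    by_cases ha : a = none
    · simp [ha]
      omega
    · simp [ha, Ne.symm ha]

theorem count_filter_len (c : List (Option Char)) :
    c.count none + (c.filter (fun x => x ≠ none)).length = c.length := by
  have key : ∀ (p : Option Char → Bool) (l : List (Option Char)),
      List.countP p l + List.countP (fun x => !p x) l = l.length := by
    intro p l
    induction l with
    | nil => simp
    | cons a t ih => by_cases hp : p a <;> simp [hp] <;> omega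
  rw [List.count_eq_countP, ← List.countP_eq_length_filter]
  have hpc : List.countP (fun x : Option Char => decide (x ≠ none)) c
      = List.countP (fun x : Option Char => !(x == none)) c := by
    apply List.countP_congr
    intro x _
    cases x <;> simp
  rw [hpc]
  exact key (fun x => x == none) c

theorem count_set_none (r : List (Option Char)) (j : Nat) (hj : j < r.length)
    (h : r.getD j none ≠ none) : (r.set j none).count none = r.count none + 1 := by
  induction r generalizing j with
  | nil => simp at hj
  | cons a t ih =>
    cases j with
    | zero =>
      rw [List.set_cons_zero, List.count_cons, List.count_cons]
      simp only [List.getD_cons_zero] at h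
      simp [h, Ne.symm h]
    | succ j =>
      rw [List.set_cons_succ, List.count_cons, List.count_cons,
        ih j (by simpa using Nat.lt_of_succ_lt_succ hj) (by simpa using h)]
      omega

-- counting ------------------------------------------------------------------
theorem cntN_foldl (b : PvBoard) : b.foldl (fun c r => c + (r.count none : Int)) 0 = (cntN b : Int) := by
  unfold cntN
  suffices h : ∀ a : Int, b.foldl (fun c r => c + (r.count none : Int)) a
      = a + (((b.map (fun r => r.count none)).sum : Nat) : Int) by
    have := h 0
    rw [zero_add] at this
    exact this
  induction b with
  | nil => simp
  | cons r t ih =>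
    intro a
    rw [List.foldl_cons, ih]
    simp only [List.map_cons, List.sum_cons]
    push_cast
    ring

theorem cntN_cols (b : PvBoard) (k : Nat) (hrect : pvRect b k) :
    cntN b = ((List.range k).map (fun j => (pvColOf b j).count none)).sum := by
  induction b generalizing k with
  | nil =>
    unfold cntN pvColOf
    simp
  | cons r t ih =>
    obtain ⟨hr, ht⟩ := (pvRect_cons r t k).mp hrect
    have hcol : ∀ j, pvColOf (r :: t) j = r.getD j none :: pvColOf t j := fun j => rfl
    have : ((List.range k).map (fun j => (pvColOf (r :: t) j).count none)).sum
        = ((List.range k).map (fun j => (if r.getD j none = none then 1 else 0) + (pvColOf t j).count none)).sum := by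
      apply congrArg
      apply List.map_congr_left
      intro j _
      rw [hcol j, List.count_cons]
      simp only [beq_iff_eq]
      exact Nat.add_comm _ _
    rw [this, sum_map_add_nat]
    have hrow : ((List.range k).map (fun j => if r.getD j none = none then 1 else 0)).sum = r.count none := by
      rw [← hr]
      exact sum_ind_eq_count r
    rw [hrow, ← ih k ht]
    unfold cntN
    simp

theorem count_compactCol (c : List (Option Char)) : (compactCol c).count none = c.count none := by
  unfold compactCol
  rw [List.count_append]
  have h1 : (List.replicate (c.length - (c.filter (fun x => x ≠ none)).length) (none : Option Char)).count none
      = c.length - (c.filter (fun x => x ≠ none)).length := by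
    simp
  have h2 : (c.filter (fun x => x ≠ none)).count none = 0 := by
    apply List.count_eq_zero.mpr
    intro hmem
    have := List.of_mem_filter hmem
    simp at this
  rw [h1, h2]
  have := count_filter_len c
  omega

theorem cntN_gravB (b : PvBoard) (n : Int) (k : Nat) (hrect : pvRect b k) (hk : k = n.toNat) :
    cntN (pvGravB b.length n b) = cntN b := by
  obtain ⟨lb, rb, cb⟩ := gravB_facts b n k hrect hk
  rw [cntN_cols _ k rb, cntN_cols _ k hrect]
  apply congrArg
  apply List.map_congr_left
  intro j hj
  rw [cb j (List.mem_range.mp hj), count_compactCol]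

theorem cntN_pvSet_none (b : PvBoard) (i j : Nat) (hi : i < b.length)
    (hj : j < (b.getD i []).length) (h : pvGet b i j ≠ none) :
    cntN (pvSet b i j none) = cntN b + 1 := by
  have hbi : List.getD b i [] = b[i] := List.getD_eq_getElem b [] hi
  have hj' : j < b[i].length := by
    rw [hbi] at hj
    exact hj
  have hsplitm : pvSet b i j none = b.take i ++ b[i].set j none :: b.drop (i+1) :=
    List.modify_eq_take_cons_drop hi
  have hsplit : b = b.take i ++ b[i] :: b.drop (i+1) := by
    rw [← List.drop_eq_getElem_cons hi, List.take_append_drop]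
  unfold cntN
  rw [hsplitm]
  conv_rhs => rw [hsplit]
  rw [List.map_append, List.map_cons, List.sum_append, List.sum_cons,
    List.map_append, List.map_cons, List.sum_append, List.sum_cons]
  have hg : b[i].getD j none ≠ none := by
    unfold pvGet at h
    rw [hbi] at h
    exact h
  rw [count_set_none b[i] j hj' hg]
  omega

theorem cntN_pvClear (hits : List (Nat × Nat)) (b : PvBoard) (hnd : hits.Nodup)
    (hin : ∀ p ∈ hits, p.1 < b.length ∧ p.2 < (b.getD p.1 []).length ∧ pvGet b p.1 p.2 ≠ none) :
    cntN (pvClear hits b) = cntN b + hits.length := by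
  induction hits generalizing b with
  | nil => simp [pvClear]
  | cons p t ih =>
    have hp := hin p (by simp)
    have hstep : cntN (pvSet b p.1 p.2 none) = cntN b + 1 :=
      cntN_pvSet_none b p.1 p.2 hp.1 hp.2.1 hp.2.2
    have hrest : cntN (pvClear t (pvSet b p.1 p.2 none)) = cntN (pvSet b p.1 p.2 none) + t.length := by
      apply ih (pvSet b p.1 p.2 none) (List.nodup_cons.mp hnd).2
      intro q hq
      have hq' := hin q (by simp [hq])
      have hqp : ¬(p.1 = q.1 ∧ p.2 = q.2) := by
        intro ⟨h1, h2⟩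
        have : p = q := Prod.ext h1 h2
        exact (List.nodup_cons.mp hnd).1 (this ▸ hq)
      rw [length_pvSet, rowlen_pvSet]
      exact ⟨hq'.1, hq'.2.1, by rw [pvGet_pvSet_ne b p.1 p.2 q.1 q.2 none hqp]; exact hq'.2.2⟩
    show cntN (pvClear t (pvSet b p.1 p.2 none)) = _
    rw [hrest, hstep]
    simp
    omega

theorem cntN_le (b : PvBoard) (k : Nat) (hrect : pvRect b k) : cntN b ≤ b.length * k := by
  induction b generalizing k with
  | nil => simp [cntN]
  | cons r t ih =>
    obtain ⟨hr, ht⟩ := (pvRect_cons r t k).mp hrect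
    have h1 : r.count none ≤ k := by
      rw [← hr]
      exact List.count_le_length
    have h2 := ih k ht
    unfold cntN at *
    simp only [List.map_cons, List.sum_cons, List.length_cons]
    calc r.count none + (t.map (fun r => r.count none)).sum ≤ k + t.length * k := by omega
      _ = (t.length + 1) * k := by ring

theorem pvCells_rect (b : PvBoard) (k : Nat) (hrect : pvRect b k) : pvCells b = b.length * k := by
  unfold pvCells
  suffices h : ∀ (bb : PvBoard) (a : Nat), pvRect bb k →
      bb.foldl (fun c r => c + r.length) a = a + bb.length * k by
    have := h b 0 hrect
    simpa using this
  intro bb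
  induction bb with
  | nil => simp
  | cons r t ih =>
    intro a hr
    obtain ⟨hr0, ht⟩ := (pvRect_cons r t k).mp hr
    rw [List.foldl_cons, ih _ ht, hr0]
    simp only [List.length_cons]
    ring

-- the main induction --------------------------------------------------------
theorem hits_props (b : PvBoard) (n : Int) (k : Nat) (hrect : pvRect b k) (hk : k = n.toNat) :
    ∀ q ∈ pvHits b n, q.1 < b.length ∧ q.2 < (b.getD q.1 []).length ∧ pvGet b q.1 q.2 ≠ none := by
  intro q hq
  obtain ⟨p, hm, hquad⟩ := (mem_pvHits b n q).mp hq
  have h1 : p.1 < b.length - 1 := hm.1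
  have h2 : p.2 < (n-1).toNat := hm.2.1
  have hn2 : p.2 + 1 < k := by omega
  have hq1 : q.1 ≤ p.1 + 1 ∧ q.2 ≤ p.2 + 1 := by
    rcases hquad with rfl | rfl | rfl | rfl <;> simp
  have hql : q.1 < b.length := by omega
  refine ⟨hql, by rw [hrect q.1 hql]; omega, ?_⟩
  obtain ⟨hne, e1, e2, e3⟩ := hm.2.2
  rcases hquad with rfl | rfl | rfl | rfl
  · exact hne
  · rw [e1]; exact hne
  · rw [e2]; exact hne
  · rw [e3]; exact hne

theorem pvRect_of_clear (hits : List (Nat × Nat)) (b : PvBoard) (k : Nat) (hrect : pvRect b k)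
    (hin : ∀ p ∈ hits, p.1 < b.length ∧ p.2 < (b.getD p.1 []).length) :
    pvRect (pvClear hits b) k := by
  obtain ⟨l, r, _⟩ := pvClear_facts hits b hin
  intro i hi
  rw [r i]
  exact hrect i (by rw [← l]; exact hi)

-- the main induction --------------------------------------------------------
theorem main_loop (n : Int) (k R : Nat) (hk : k = n.toNat) :
    ∀ fuel b total, pvRect b k → b.length = R → R * k < fuel + cntN b →
    pvLoopB n R fuel b total = total + (cntN (runA n fuel b) : Int) - (cntN b : Int) := by
  intro fuel
  induction fuel with
  | zero =>
    intro b total hrect hR hlt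
    have := cntN_le b k hrect
    rw [hR] at this
    omega
  | succ fuel ih =>
    intro b total hrect hR hlt
    have hstep : pvLoopB n R (fuel+1) b total =
        if pvHits b n = [] then total
        else pvLoopB n R fuel (pvGravB R n (pvClear (pvHits b n) b)) (total + ((pvHits b n).length : Int)) := rfl
    rw [hstep]
    by_cases hnil : pvHits b n = []
    · rw [if_pos hnil]
      have hsc : pvScanT b n = [] := (pvHits_nil_iff b n).mp hnil
      unfold runA
      rw [if_pos hsc]
      ring
    · rw [if_neg hnil]
      have hsc : pvScanT b n ≠ [] := fun h => hnil ((pvHits_nil_iff b n).mpr h)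
      have hprops := hits_props b n k hrect hk
      have hin : ∀ p ∈ pvHits b n, p.1 < b.length ∧ p.2 < (b.getD p.1 []).length :=
        fun p hp => ⟨(hprops p hp).1, (hprops p hp).2.1⟩
      obtain ⟨lC, rC, _⟩ := pvClear_facts (pvHits b n) b hin
      have hrectC : pvRect (pvClear (pvHits b n) b) k := pvRect_of_clear _ b k hrect hin
      have hcntC : cntN (pvClear (pvHits b n) b) = cntN b + (pvHits b n).length :=
        cntN_pvClear (pvHits b n) b (nodup_pvHits b n)
          (fun p hp => ⟨(hprops p hp).1, (hprops p hp).2.1, (hprops p hp).2.2⟩)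
      have hRC : (pvClear (pvHits b n) b).length = R := by rw [lC, hR]
      have hb2 : pvGravityA (pvZero (pvScanT b n) b) = pvGravB R n (pvClear (pvHits b n) b) := by
        rw [pvZero_scanT_eq_pvClear_hits b n k hrect hk,
          gravityA_eq_gravB (pvClear (pvHits b n) b) n k hrectC hk, hRC]
      obtain ⟨lG, rG, _⟩ := gravB_facts (pvClear (pvHits b n) b) n k hrectC hk
      have hcntG : cntN (pvGravB R n (pvClear (pvHits b n) b)) = cntN b + (pvHits b n).length := by
        rw [← hRC, cntN_gravB (pvClear (pvHits b n) b) n k hrectC hk]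
        exact hcntC
    
      have hrectG : pvRect (pvGravB R n (pvClear (pvHits b n) b)) k := by
        rw [← hRC]
        exact rG
      have hRG : (pvGravB R n (pvClear (pvHits b n) b)).length = R := by
        rw [← hRC]
        exact lG
      have hpos : 1 ≤ (pvHits b n).length := List.length_pos_of_ne_nil hnil
      have hihres := ih (pvGravB R n (pvClear (pvHits b n) b)) (total + ((pvHits b n).length : Int))
        hrectG hRG (by rw [hcntG]; omega)
      rw [hihres]
      have hterm : runA n (fuel+1) b = runA n fuel (pvGravB R n (pvClear (pvHits b n) b)) := by
        unfold runA
        rw [if_neg hsc]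
        have : pvTerminate n (fuel+1) (pvScanT b n) b =
            if pvScanT (pvGravityA (pvZero (pvScanT b n) b)) n = []
            then pvGravityA (pvZero (pvScanT b n) b)
            else pvTerminate n fuel (pvScanT (pvGravityA (pvZero (pvScanT b n) b)) n)
              (pvGravityA (pvZero (pvScanT b n) b)) := rfl
        rw [this, hb2]
      rw [hterm, hcntG]
      push_cast
      ring

theorem cntN_init (board : List String) : cntN (board.map (fun s => s.toList.map some)) = 0 := by
  unfold cntN
  rw [List.map_map]
  apply List.sum_eq_zero
  intro x hx
  obtain ⟨s, _, rfl⟩ := List.mem_map.mp hx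
  simp [Function.comp, List.count_eq_zero]

theorem rows_init (board : List String) :
    ∀ i, i < (board.map (fun s => s.toList.map some)).length →
      ∃ s ∈ board, (board.map (fun s => s.toList.map some)).getD i [] = s.toList.map some := by
  intro i hi
  rw [List.length_map] at hi
  refine ⟨board[i], List.getElem_mem hi, ?_⟩
  rw [List.getD_eq_getElem _ _ (by rw [List.length_map]; exact hi)]
  simp

theorem solution_eq_alt_rect (m n : Int) (board : List String)
    (hp : ∀ s ∈ board, (s.toList.length : Int) = n) :
    solution m n board = solution_alt m n board := by
  set b0 : PvBoard := board.map (fun s => s.toList.map some) with hb0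
  have hrect : pvRect b0 n.toNat := by
    intro i hi
    obtain ⟨s, hs, he⟩ := rows_init board i hi
    rw [he, List.length_map]
    have := hp s hs
    omega
  have hzfree : ∀ i j, i < b0.length → j < n.toNat → pvGet b0 i j ≠ none := by
    intro i j hi hj
    obtain ⟨s, hs, he⟩ := rows_init board i hi
    unfold pvGet
    rw [he]
    have hjl : j < (s.toList.map some).length := by
      rw [List.length_map]
      have := hp s hs
      omega
    rw [List.getD_eq_getElem _ _ hjl]
    simp
  have hcnt0 : cntN b0 = 0 := cntN_init board
  have hz : ∀ i j, i < b0.length - 1 → j < (n-1).toNat → pvGet b0 i j ≠ none := by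
    intro i j hi hj
    exact hzfree i j (by omega) (by omega)
  have hscan : pvScanA b0 n = pvScanT b0 n := pvScanA_eq_pvScanT b0 n hz
  have hcells : pvCells b0 = b0.length * n.toNat := pvCells_rect b0 n.toNat hrect
  have hsolA : solution m n board = (if pvScanA b0 n = [] then b0
      else pvTerminate n (pvCells b0 + 1) (pvScanA b0 n) b0).foldl
        (fun c r => c + (r.count none : Int)) 0 := rfl
  have hsolB : solution_alt m n board = pvLoopB n b0.length (pvCells b0 + 1) b0 0 := rfl
  rw [hsolA, hsolB, cntN_foldl, hscan]
  have hrun : (if pvScanT b0 n = [] then b0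
      else pvTerminate n (pvCells b0 + 1) (pvScanT b0 n) b0) = runA n (pvCells b0 + 1) b0 := by
    unfold runA
    rfl
  rw [hrun]
  rw [main_loop n n.toNat b0.length rfl (pvCells b0 + 1) b0 0 hrect rfl
    (by rw [hcnt0, hcells]; omega)]
  rw [hcnt0]
  push_cast
  ring

theorem solution_eq_alt_small (m n : Int) (board : List String) (hn : n ≤ 1) :
    solution m n board = solution_alt m n board := by
  set b0 : PvBoard := board.map (fun s => s.toList.map some) with hb0
  have hn0 : ((n : Int)-1).toNat = 0 := by omega
  have hfix : ∀ (L : List Nat) (st : List (Nat × Nat)), L.foldl (fun st _ => st) st = st := by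
    intro L
    induction L with
    | nil => exact fun st => rfl
    | cons a t ih => exact fun st => ih st
  have hscanA : pvScanA b0 n = (List.range (b0.length - 1)).foldl (fun st i =>
      (List.range (n-1).toNat).foldl (fun st j =>
        if pvGet b0 (i+1) j = pvGet b0 i j ∧ pvGet b0 i (j+1) = pvGet b0 i j ∧ pvGet b0 (i+1) (j+1) = pvGet b0 i j
        then st ++ [(i,j)] else st) st) [] := rfl
  rw [hn0] at hscanA
  simp only [List.range_zero, List.foldl_nil] at hscanA
  rw [hfix] at hscanA
  have hhits : pvHits b0 n = (List.range (b0.length - 1)).foldl (fun hs i =>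
      (List.range (n-1).toNat).foldl (fun hs j =>
        if pvGet b0 i j ≠ none ∧ pvGet b0 (i+1) j = pvGet b0 i j ∧ pvGet b0 i (j+1) = pvGet b0 i j ∧ pvGet b0 (i+1) (j+1) = pvGet b0 i j
        then PySem.Set.update hs [(i,j),(i+1,j),(i,j+1),(i+1,j+1)] else hs) hs) PySem.Set.empty := rfl
  rw [hn0] at hhits
  simp only [List.range_zero, List.foldl_nil] at hhits
  rw [hfix] at hhits
  have hsolA : solution m n board = (if pvScanA b0 n = [] then b0
      else pvTerminate n (pvCells b0 + 1) (pvScanA b0 n) b0).foldl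
        (fun c r => c + (r.count none : Int)) 0 := rfl
  have hsolB : solution_alt m n board = pvLoopB n b0.length (pvCells b0 + 1) b0 0 := rfl
  rw [hsolA, hsolB, hscanA]
  rw [if_pos rfl, cntN_foldl, cntN_init]
  have hloop2 : pvLoopB n b0.length (pvCells b0 + 1) b0 0 =
      if pvHits b0 n = [] then (0 : Int)
      else pvLoopB n b0.length (pvCells b0) (pvGravB b0.length n (pvClear (pvHits b0 n) b0)) (0 + ((pvHits b0 n).length : Int)) := rfl
  rw [hloop2, hhits]
  simp

-- ===== VERDICT (by name: the statement is the Claim_ definition above) =====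
theorem solution_spec : Claim_equal_solution := by
  intro m n board _ hpre
  unfold Spec_solution
  rcases hpre with hn | hrect
  · exact solution_eq_alt_small m n board hn
  · exact solution_eq_alt_rect m n board hrect
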